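-- pv_equiv track=rewrite | github.com/allenenriquezai/Allen-Enriquez | tools/check_outcomes.py | _update_last_updated
-- ===== SOURCE A (Python) =====
-- def _update_last_updated(content, today):
--     """Update the > Last updated: line in an intel doc."""
--     lines = content.split('\n')
--     for i, line in enumerate(lines):
--         if line.startswith('> Last updated:'):
--             lines[i] = f'> Last updated: {today}'
--         elif line.startswith('> Updated by:'):
--             lines[i] = f'> Updated by: outcome_tracker (automated)'
--     return '\n'.join(lines)
-- ===== SOURCE B (Python) =====
-- import re
--
-- _HEADER_RE = re.compile(r'^(?:> Last updated:|> Updated by:).*', re.MULTILINE)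
--
--
-- def _update_last_updated(content, today):
--     """Update the > Last updated: line in an intel doc."""
--     def repl(m):
--         if m.group(0).startswith('> Last updated:'):
--             return f'> Last updated: {today}'
--         return '> Updated by: outcome_tracker (automated)'
--     return _HEADER_RE.sub(repl, content)
-- ===== Notes on version B (the rewrite author's own statement) =====
-- stated objective: idiomatic
-- what changed: Replaces the split('\n') / enumerate loop with indexed assignment / '\n'.join pipeline by a single precompiled re.sub over the whole text with re.MULTILINE and a replacement function (no line list, no explicit loop).
import Mathlib
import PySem

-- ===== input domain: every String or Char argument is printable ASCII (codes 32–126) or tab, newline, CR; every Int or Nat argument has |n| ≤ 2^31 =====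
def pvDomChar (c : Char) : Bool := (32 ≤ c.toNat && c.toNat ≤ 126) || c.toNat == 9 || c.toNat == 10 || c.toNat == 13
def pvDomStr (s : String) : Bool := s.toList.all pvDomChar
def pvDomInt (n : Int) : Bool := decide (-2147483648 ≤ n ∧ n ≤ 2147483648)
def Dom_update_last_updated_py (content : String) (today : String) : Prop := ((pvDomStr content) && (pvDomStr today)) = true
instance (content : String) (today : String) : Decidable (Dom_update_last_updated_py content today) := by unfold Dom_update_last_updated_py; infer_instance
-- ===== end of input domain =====

-- B replaces A's split-into-lines / indexed-loop / rejoin by a single regex-substitution pass over the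
-- whole text (one re.sub with a replacement function); same return value, different decomposition.

-- ===== PORT A =====
-- A: lines = content.split('\n'); for i, line in enumerate(lines): lines[i] = …; return '\n'.join(lines)
-- ported on List Char (PySem.Chars), as PYSEM.md prescribes; enumerate's index i is always ≥ 0,
-- so the assignment lines[i] = v is List.set i.toNat v.
def pvALoop (td : List Char) (lines : List (List Char)) : List (List Char) :=
  (PySem.List.enumerate lines).foldl (fun ls p =>
    if PySem.Chars.startswith p.2 "> Last updated:".toList then
      ls.set p.1.toNat ("> Last updated: ".toList ++ td)
    else if PySem.Chars.startswith p.2 "> Updated by:".toList then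
      ls.set p.1.toNat "> Updated by: outcome_tracker (automated)".toList
    else ls) lines

def update_last_updated_py (content : String) (today : String) : String :=
  String.ofList (PySem.Chars.join ['\n'] (pvALoop today.toList (PySem.Chars.splitOn content.toList ['\n'])))

-- ===== PORT B =====
-- B: one pass of re.sub(r'^(?:> Last updated:|> Updated by:).*', repl, content, flags=re.MULTILINE),
-- ported by hand, exact for this anchored pattern: under MULTILINE, '^….*' matches, at each line
-- start, the span up to the next '\n'; pvRepl is the replacement function repl (the span is passed
-- through unchanged when neither alternative matches, i.e. re.sub leaves that line alone).
def pvRepl (td line : List Char) : List Char :=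
  if PySem.Chars.startswith line "> Last updated:".toList then "> Last updated: ".toList ++ td
  else if PySem.Chars.startswith line "> Updated by:".toList then
    "> Updated by: outcome_tracker (automated)".toList
  else line

def pvSub (td cs : List Char) : List Char :=
  match h : cs.dropWhile (· ≠ '\n') with
  | [] => pvRepl td (cs.takeWhile (· ≠ '\n'))
  | _ :: tail => pvRepl td (cs.takeWhile (· ≠ '\n')) ++ '\n' :: pvSub td tail
termination_by cs.length
decreasing_by
  have hle := List.length_dropWhile_le (p := fun c => decide (c ≠ '\n')) (l := cs)
  rw [h] at hle; simp at hle; omega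

def update_last_updated_py_alt (content : String) (today : String) : String :=
  String.ofList (pvSub today.toList content.toList)

-- ===== PRECONDITION & SPEC =====
def Spec_update_last_updated_py (content : String) (today : String) (out : String) : Prop := out = update_last_updated_py_alt content today
instance (content : String) (today : String) (out : String) : Decidable (Spec_update_last_updated_py content today out) := by unfold Spec_update_last_updated_py; infer_instance

-- ===== CLAIM (what is proved, stated in full; the proofs are below) =====
def Claim_equal_update_last_updated_py : Prop := ∀ (content : String) (today : String), Dom_update_last_updated_py content today → Spec_update_last_updated_py content today (update_last_updated_py content today)

-- ===== LEMMAS AND PROOFS =====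

-- proof-only view of content.split('\n'): the same recursion shape as pvSub
def pvLines (cs : List Char) : List (List Char) :=
  match h : cs.dropWhile (· ≠ '\n') with
  | [] => [cs.takeWhile (· ≠ '\n')]
  | _ :: tail => cs.takeWhile (· ≠ '\n') :: pvLines tail
termination_by cs.length
decreasing_by
  have hle := List.length_dropWhile_le (p := fun c => decide (c ≠ '\n')) (l := cs)
  rw [h] at hle; simp at hle; omega

lemma pvLines_eq (cs : List Char) : pvLines cs =
    (match cs.dropWhile (· ≠ '\n') with
     | [] => [cs.takeWhile (· ≠ '\n')]
     | _ :: tail => cs.takeWhile (· ≠ '\n') :: pvLines tail) := by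
  rw [pvLines]
  split <;> rename_i h <;> simp only [h]

lemma pvLines_nil : pvLines [] = [[]] := by
  rw [pvLines_eq]; simp

lemma pvLines_cons_nl (rest : List Char) : pvLines ('\n' :: rest) = [] :: pvLines rest := by
  rw [pvLines_eq]; simp

lemma pvLines_cons (c : Char) (rest : List Char) (hc : c ≠ '\n') :
    pvLines (c :: rest) = (pvLines rest).modifyHead (c :: ·) := by
  rw [pvLines_eq, pvLines_eq (cs := rest)]
  rcases hdw : rest.dropWhile (· ≠ '\n') with _ | ⟨d, tail⟩ <;>
    · simp only [ne_eq, decide_not] at hdw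
      simp [hc, hdw]

lemma pvLines_ne_nil (cs : List Char) : pvLines cs ≠ [] := by
  rw [pvLines_eq]
  rcases cs.dropWhile (· ≠ '\n') with _ | _ <;> simp

lemma splitOn_go_eq (fuel : Nat) (l cur : List Char) (accs : List (List Char))
    (hf : l.length < fuel) :
    PySem.Chars.splitOn.go ['\n'] fuel l cur accs =
      accs.reverse ++ (pvLines l).modifyHead (cur.reverse ++ ·) := by
  induction fuel generalizing l cur accs with
  | zero => omega
  | succ f ih =>
    rcases l with _ | ⟨c, rest⟩
    · rw [PySem.Chars.splitOn.go]
      · simp [pvLines_nil]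
      · omega
    · rw [PySem.Chars.splitOn.go]
      by_cases hc : c = '\n'
      · subst hc
        have hp : List.isPrefixOf ['\n'] ('\n' :: rest) = true := by simp [List.isPrefixOf]
        simp only [hp]
        rw [show List.drop ['\n'].length ('\n' :: rest) = rest from rfl]
        rw [ih rest [] (cur.reverse :: accs) (by simp at hf ⊢; omega)]
        rw [pvLines_cons_nl]
        rcases hL : pvLines rest with _ | ⟨a, t⟩
        · exact absurd hL (pvLines_ne_nil rest)
        · simp
      · have hp : List.isPrefixOf ['\n'] (c :: rest) = false := by
          simp [List.isPrefixOf]; exact fun h => absurd h.symm hc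
        simp only [hp, Bool.false_eq_true, if_false]
        rw [ih rest (c :: cur) accs (by simp at hf ⊢; omega)]
        rw [pvLines_cons c rest hc]
        rcases hL : pvLines rest with _ | ⟨a, t⟩
        · exact absurd hL (pvLines_ne_nil rest)
        · simp

lemma splitOn_eq_pvLines (cs : List Char) :
    PySem.Chars.splitOn cs ['\n'] = pvLines cs := by
  unfold PySem.Chars.splitOn
  rw [splitOn_go_eq cs.length.succ cs [] [] (by omega)]
  rcases hL : pvLines cs with _ | ⟨a, t⟩
  · exact absurd hL (pvLines_ne_nil cs)
  · simp

lemma pvALoop_go (td : List Char) (xs done : List (List Char)) :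
    (PySem.List.enumerate xs (done.length : Int)).foldl (fun ls p =>
      if PySem.Chars.startswith p.2 "> Last updated:".toList then
        ls.set p.1.toNat ("> Last updated: ".toList ++ td)
      else if PySem.Chars.startswith p.2 "> Updated by:".toList then
        ls.set p.1.toNat "> Updated by: outcome_tracker (automated)".toList
      else ls) (done.map (pvRepl td) ++ xs) = (done ++ xs).map (pvRepl td) := by
  induction xs generalizing done with
  | nil => simp [PySem.List.enumerate]
  | cons x rest ih =>
    rw [PySem.List.enumerate]
    simp only [List.foldl_cons]
    have hset : ∀ v : List Char,
        (done.map (pvRepl td) ++ x :: rest).set ((done.length : Int)).toNat v =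
          done.map (pvRepl td) ++ v :: rest := by
      intro v; simp
    have hstep :
        (if PySem.Chars.startswith x "> Last updated:".toList then
          (done.map (pvRepl td) ++ x :: rest).set ((done.length : Int)).toNat
            ("> Last updated: ".toList ++ td)
        else if PySem.Chars.startswith x "> Updated by:".toList then
          (done.map (pvRepl td) ++ x :: rest).set ((done.length : Int)).toNat
            "> Updated by: outcome_tracker (automated)".toList
        else (done.map (pvRepl td) ++ x :: rest)) =
          (done ++ [x]).map (pvRepl td) ++ rest := by
      split_ifs with h1 h2
      · have hx : pvRepl td x = "> Last updated: ".toList ++ td := by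
          unfold pvRepl; rw [if_pos h1]
        rw [hset]; simp [hx]
      · have hx : pvRepl td x = "> Updated by: outcome_tracker (automated)".toList := by
          unfold pvRepl; rw [if_neg h1, if_pos h2]
        rw [hset]; simp [hx]
      · have hx : pvRepl td x = x := by
          unfold pvRepl; rw [if_neg h1, if_neg h2]
        simp [hx]
    rw [hstep]
    have hlen : (done.length : Int) + 1 = (((done ++ [x]).length : Nat) : Int) := by simp
    rw [hlen]
    simpa using ih (done ++ [x])

lemma pvALoop_eq (td : List Char) (lines : List (List Char)) :
    pvALoop td lines = lines.map (pvRepl td) := by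
  simpa [pvALoop] using pvALoop_go td lines []

lemma pvSub_unf (td cs : List Char) : pvSub td cs =
    (match cs.dropWhile (· ≠ '\n') with
     | [] => pvRepl td (cs.takeWhile (· ≠ '\n'))
     | _ :: tail => pvRepl td (cs.takeWhile (· ≠ '\n')) ++ '\n' :: pvSub td tail) := by
  rw [pvSub]
  split <;> rename_i h <;> simp only [h]

lemma pvSub_eq (td cs : List Char) :
    pvSub td cs = PySem.Chars.join ['\n'] ((pvLines cs).map (pvRepl td)) := by
  induction cs using pvSub.induct with
  | case1 cs h =>
    rw [pvSub_unf, pvLines_eq]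
    simp only [h]
    simp [PySem.Chars.join, List.intercalate]
  | case2 cs c tail h ih =>
    rw [pvSub_unf, pvLines_eq]
    simp only [h]
    rw [ih]
    rcases hL : pvLines tail with _ | ⟨a, t⟩
    · exact absurd hL (pvLines_ne_nil tail)
    · simp [PySem.Chars.join, List.intercalate]

-- ===== VERDICT (by name: the statement is the Claim_ definition above) =====
theorem update_last_updated_py_spec : Claim_equal_update_last_updated_py := by
  intro content today _
  unfold Spec_update_last_updated_py update_last_updated_py update_last_updated_py_alt
  rw [splitOn_eq_pvLines, pvALoop_eq, pvSub_eq]
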